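-- pv_equiv track=rewrite | github.com/rhCat/lpp | src/lpp/util/blueprint_differ/compute.py | _diff_terminal_states
-- ===== SOURCE A (Python) =====
-- from typing import Any, Dict, List, Optional, Set, Tuple
--
-- class ChangeType:
--     ADDED = "added"
--     REMOVED = "removed"
--     MODIFIED = "modified"
--     UNCHANGED = "unchanged"
--
-- class ElementType:
--     STATE = "state"
--     TRANSITION = "transition"
--     GATE = "gate"
--     ACTION = "action"
--     CONTEXT_PROPERTY = "context_property"
--     ENTRY_STATE = "entry_state"
--     TERMINAL_STATE = "terminal_state"
--     METADATA = "metadata"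
--
-- def make_change(
--     element_type: str,
--     change_type: str,
--     key: str,
--     left_value: Any = None,
--     right_value: Any = None,
--     details: str = None
-- ) -> Dict[str, Any]:
--     """Create a standardized change record."""
--     change = {
--         "element_type": element_type,
--         "change_type": change_type,
--         "key": key
--     }
--     if left_value is not None:
--         change["left"] = left_value
--     if right_value is not None:
--         change["right"] = right_value
--     if details:
--         change["details"] = details
--     return change
--
-- def _diff_terminal_states(
--     left: List[str],
--     right: List[str]
-- ) -> List[Dict[str, Any]]:
--     """Diff terminal_states arrays."""
--     changes = []
--     leftSet = set(left or [])
--     rightSet = set(right or [])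
--
--     for state in sorted(rightSet - leftSet):
--         changes.append(make_change(
--             ElementType.TERMINAL_STATE, ChangeType.ADDED, state
--         ))
--
--     for state in sorted(leftSet - rightSet):
--         changes.append(make_change(
--             ElementType.TERMINAL_STATE, ChangeType.REMOVED, state
--         ))
--
--     return changes
-- ===== SOURCE B (Python) =====
-- from typing import Any, Dict, List
--
-- class ChangeType:
--     ADDED = "added"
--     REMOVED = "removed"
--     MODIFIED = "modified"
--     UNCHANGED = "unchanged"
--
-- class ElementType:
--     STATE = "state"
--     TRANSITION = "transition"
--     GATE = "gate"
--     ACTION = "action"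
--     CONTEXT_PROPERTY = "context_property"
--     ENTRY_STATE = "entry_state"
--     TERMINAL_STATE = "terminal_state"
--     METADATA = "metadata"
--
-- def make_change(element_type, change_type, key, left_value=None, right_value=None, details=None):
--     change = {"element_type": element_type, "change_type": change_type, "key": key}
--     if left_value is not None:
--         change["left"] = left_value
--     if right_value is not None:
--         change["right"] = right_value
--     if details:
--         change["details"] = details
--     return change
--
-- def _diff_terminal_states(left: List[str], right: List[str]) -> List[Dict[str, Any]]:
--     """Diff terminal_states arrays by a two-pointer merge of the sorted
--     deduplicated lists: no set differences are ever materialized; a key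
--     present on only one side is detected by the comparison during the merge."""
--     ls = sorted(set(left or []))
--     rs = sorted(set(right or []))
--     added, removed = [], []
--     i = j = 0
--     while i < len(ls) and j < len(rs):
--         if ls[i] == rs[j]:
--             i += 1
--             j += 1
--         elif ls[i] < rs[j]:
--             removed.append(make_change(ElementType.TERMINAL_STATE, ChangeType.REMOVED, ls[i]))
--             i += 1
--         else:
--             added.append(make_change(ElementType.TERMINAL_STATE, ChangeType.ADDED, rs[j]))
--             j += 1
--     while i < len(ls):
--         removed.append(make_change(ElementType.TERMINAL_STATE, ChangeType.REMOVED, ls[i]))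
--         i += 1
--     while j < len(rs):
--         added.append(make_change(ElementType.TERMINAL_STATE, ChangeType.ADDED, rs[j]))
--         j += 1
--     return added + removed
-- ===== Notes on version B (the rewrite author's own statement) =====
-- stated objective: alternative
-- what changed: Instead of computing two set differences and sorting each, B sorts the two deduplicated key lists once and runs a classic two-pointer merge over them, emitting REMOVED/ADDED records from the comparisons as the pointers advance; no set difference is ever materialized.
import Mathlib
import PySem

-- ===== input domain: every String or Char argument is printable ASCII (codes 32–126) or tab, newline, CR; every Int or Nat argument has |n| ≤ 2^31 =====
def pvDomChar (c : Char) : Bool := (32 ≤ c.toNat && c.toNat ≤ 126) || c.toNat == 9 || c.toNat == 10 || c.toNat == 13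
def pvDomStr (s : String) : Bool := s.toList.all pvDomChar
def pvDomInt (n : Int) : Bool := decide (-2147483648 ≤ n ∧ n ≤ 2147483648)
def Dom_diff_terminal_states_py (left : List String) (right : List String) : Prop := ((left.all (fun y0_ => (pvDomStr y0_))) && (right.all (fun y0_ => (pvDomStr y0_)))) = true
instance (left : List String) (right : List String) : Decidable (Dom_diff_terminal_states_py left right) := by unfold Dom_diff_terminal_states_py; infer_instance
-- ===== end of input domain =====

-- B diffs by a two-pointer merge over the two sorted deduplicated lists (no set differences materialized); alternative decomposition, same cost.


-- ===== PORT A =====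
-- make_change with only the three always-present keys (left_value/right_value/details are None here)
def pvMakeChange (elementType changeType key : String) : List (String × String) :=
  [("element_type", elementType), ("change_type", changeType), ("key", key)]

def diff_terminal_states_py (left : List String) (right : List String) : List (List (String × String)) :=
  let leftSet : PySem.Set String := PySem.Set.ofList left
  let rightSet : PySem.Set String := PySem.Set.ofList right
  let changes : List (List (String × String)) :=
    (PySem.List.sorted (PySem.Set.diff rightSet leftSet) (fun x => x) false).foldl
      (fun acc state => acc ++ [pvMakeChange "terminal_state" "added" state]) []
  let changes :=
    (PySem.List.sorted (PySem.Set.diff leftSet rightSet) (fun x => x) false).foldl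
      (fun acc state => acc ++ [pvMakeChange "terminal_state" "removed" state]) changes
  changes

-- ===== PORT B =====
-- the two-pointer merge loop of Source B: walks both sorted lists, bucketing
-- left-only keys as REMOVED and right-only keys as ADDED
def pvMerge : List String → List String → List (List (String × String)) × List (List (String × String))
  | [], ys => (ys.map (pvMakeChange "terminal_state" "added"), [])
  | x :: xs, [] => ([], (x :: xs).map (pvMakeChange "terminal_state" "removed"))
  | x :: xs, y :: ys =>
    if x == y then pvMerge xs ys
    else if x < y then
      let p := pvMerge xs (y :: ys)
      (p.1, pvMakeChange "terminal_state" "removed" x :: p.2)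
    else
      let p := pvMerge (x :: xs) ys
      (pvMakeChange "terminal_state" "added" y :: p.1, p.2)
termination_by xs ys => xs.length + ys.length
decreasing_by all_goals (simp only [List.length_cons]; omega)

def diff_terminal_states_py_alt (left : List String) (right : List String) : List (List (String × String)) :=
  let ls := PySem.List.sorted (PySem.Set.ofList left) (fun x => x) false
  let rs := PySem.List.sorted (PySem.Set.ofList right) (fun x => x) false
  let p := pvMerge ls rs
  p.1 ++ p.2

-- ===== PRECONDITION & SPEC =====
def Spec_diff_terminal_states_py (left : List String) (right : List String) (out : List (List (String × String))) : Prop := out = diff_terminal_states_py_alt left right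
instance (left : List String) (right : List String) (out : List (List (String × String))) : Decidable (Spec_diff_terminal_states_py left right out) := by unfold Spec_diff_terminal_states_py; infer_instance

-- ===== CLAIM (what is proved, stated in full; the proofs are below) =====
def Claim_equal_diff_terminal_states_py : Prop := ∀ (left : List String) (right : List String), Dom_diff_terminal_states_py left right → Spec_diff_terminal_states_py left right (diff_terminal_states_py left right)

-- ===== LEMMAS AND PROOFS =====

-- the merge of two strictly increasing lists produces exactly the membership-filtered buckets
theorem pvMerge_eq (xs ys : List String) (hx : xs.Pairwise (· < ·)) (hy : ys.Pairwise (· < ·)) :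
    pvMerge xs ys =
      ((ys.filter fun y => decide (y ∉ xs)).map (pvMakeChange "terminal_state" "added"),
       (xs.filter fun x => decide (x ∉ ys)).map (pvMakeChange "terminal_state" "removed")) := by
  fun_induction pvMerge xs ys with
  | case1 ys => simp
  | case2 x xs => simp
  | case3 x xs y ys heq ih =>
    have hxy : x = y := by simpa using heq
    subst hxy
    have h1 : (x :: ys).filter (fun z => decide (z ∉ x :: xs)) = ys.filter (fun z => decide (z ∉ xs)) := by
      rw [List.filter_cons, if_neg (by simp)]
      apply List.filter_congr
      intro z hz
      have hlt : x < z := List.rel_of_pairwise_cons hy hz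
      simp [hlt.ne']
    have h2 : (x :: xs).filter (fun z => decide (z ∉ x :: ys)) = xs.filter (fun z => decide (z ∉ ys)) := by
      rw [List.filter_cons, if_neg (by simp)]
      apply List.filter_congr
      intro z hz
      have hlt : x < z := List.rel_of_pairwise_cons hx hz
      simp [hlt.ne']
    rw [h1, h2, ih hx.of_cons hy.of_cons]
  | case4 x xs y ys heq hlt p ih =>
    have hp : p = pvMerge xs (y :: ys) := rfl
    have h1 : (y :: ys).filter (fun z => decide (z ∉ x :: xs)) = (y :: ys).filter (fun z => decide (z ∉ xs)) := by
      apply List.filter_congr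
      intro z hz
      have hyz : y ≤ z := by
        rcases List.mem_cons.mp hz with h | h
        · exact le_of_eq h.symm
        · exact le_of_lt (List.rel_of_pairwise_cons hy h)
      have : x < z := lt_of_lt_of_le hlt hyz
      simp [this.ne']
    have h2 : (x :: xs).filter (fun z => decide (z ∉ y :: ys)) =
        x :: (xs.filter (fun z => decide (z ∉ y :: ys))) := by
      have hx2 : x ∉ y :: ys := by
        simp only [List.mem_cons, not_or]
        exact ⟨hlt.ne, fun hmem => absurd hlt (not_lt_of_gt (List.rel_of_pairwise_cons hy hmem))⟩
      rw [List.filter_cons, if_pos (decide_eq_true hx2)]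
    rw [hp, ih hx.of_cons hy, h1, h2]
    rfl
  | case5 x xs y ys heq hnlt p ih =>
    have hp : p = pvMerge (x :: xs) ys := rfl
    have hyx : y < x := by
      rcases lt_trichotomy x y with h | h | h
      · exact absurd h hnlt
      · exact absurd (by simpa using h) (by simpa using heq)
      · exact h
    have h1 : (x :: xs).filter (fun z => decide (z ∉ y :: ys)) = (x :: xs).filter (fun z => decide (z ∉ ys)) := by
      apply List.filter_congr
      intro z hz
      have hxz : x ≤ z := by
        rcases List.mem_cons.mp hz with h | h
        · exact le_of_eq h.symm
        · exact le_of_lt (List.rel_of_pairwise_cons hx h)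
      have : y < z := lt_of_lt_of_le hyx hxz
      simp [this.ne']
    have h2 : (y :: ys).filter (fun z => decide (z ∉ x :: xs)) =
        y :: (ys.filter (fun z => decide (z ∉ x :: xs))) := by
      have hy2 : y ∉ x :: xs := by
        simp only [List.mem_cons, not_or]
        exact ⟨hyx.ne, fun hmem => absurd (List.rel_of_pairwise_cons hx hmem) (not_lt_of_gt hyx)⟩
      rw [List.filter_cons, if_pos (decide_eq_true hy2)]
    rw [hp, ih hx hy.of_cons, h1, h2]
    rfl

-- filtering one sorted set by non-membership in the other's sorted list = sorted set difference
theorem pvFilterSorted (s t : PySem.Set String) (hs : s.Nodup) :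
    (PySem.List.sorted s (fun x => x) false).filter
        (fun k => decide (k ∉ PySem.List.sorted t (fun x => x) false))
      = PySem.List.sorted (PySem.Set.diff s t) (fun x => x) false := by
  symm
  apply PySem.List.sorted_eq_of_perm_of_pairwise_lt
  · apply (List.perm_ext_iff_of_nodup
      (List.Nodup.filter _ ((PySem.List.sorted_perm _ _ _).nodup_iff.mpr hs))
      (PySem.Set.nodup_diff s t hs)).mpr
    intro x
    simp only [List.mem_filter, PySem.List.mem_sorted, PySem.Set.mem_diff, decide_eq_true_eq]
  · apply List.Pairwise.filter
    have hle := PySem.List.sorted_pairwise s (fun x : String => x)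
    have hnd : (PySem.List.sorted s (fun x : String => x) false).Nodup :=
      (PySem.List.sorted_perm _ _ _).nodup_iff.mpr hs
    exact hle.imp₂ (fun a b hab hne => lt_of_le_of_ne hab hne) hnd

-- ===== VERDICT (by name: the statement is the Claim_ definition above) =====
theorem diff_terminal_states_py_spec : Claim_equal_diff_terminal_states_py := by
  intro left right _
  unfold Spec_diff_terminal_states_py diff_terminal_states_py diff_terminal_states_py_alt
  simp only [PySem.List.foldl_append_singleton_eq_map, List.nil_append]
  rw [pvMerge_eq _ _ (PySem.List.sorted_ofList_pairwise_lt left) (PySem.List.sorted_ofList_pairwise_lt right)]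
  simp only
  rw [pvFilterSorted _ _ (PySem.Set.nodup_ofList right),
      pvFilterSorted _ _ (PySem.Set.nodup_ofList left)]
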